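-- pv_equiv track=rewrite | github.com/tgyuuAn/Algorithm | Receive_The_Result_Report_python.py | solution
-- ===== SOURCE A (Python) =====
-- def solution(id_list, reports, k):
--     dic = dict()
--     answer = dict()
--     log = set()
--
--     for x in id_list:
--         dic[x] = []
--         answer[x] = 0
--
--     for report in reports:
--         if report not in log:
--             log.add(report)
--             a,b = report.split()
--             dic[b].append(a)
--
--     for x in dic:
--         if len(dic[x]) >= k:
--             for y in dic[x]:
--                 answer[y] += 1
--
--     return list(answer.values())
-- ===== SOURCE B (Python) =====
-- def solution(id_list, reports, k):
--     pairs = [r.split() for r in dict.fromkeys(reports)]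
--     hot = {p[1] for p in pairs if sum(q[1] == p[1] for q in pairs) >= k}
--     return [sum(1 for p in pairs if p[0] == x and p[1] in hot) for x in dict.fromkeys(id_list)]
-- ===== Notes on version B (the rewrite author's own statement) =====
-- stated objective: simpler
-- what changed: Drops A's adjacency lists, answer table and increment passes entirely: B dedups the reports, determines the 'hot' targets by direct counting over the flat pair list, and builds each output entry on demand by counting that user's pairs aimed at hot targets (pull-style per-user counting instead of A's push-style table increments).
import Mathlib
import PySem

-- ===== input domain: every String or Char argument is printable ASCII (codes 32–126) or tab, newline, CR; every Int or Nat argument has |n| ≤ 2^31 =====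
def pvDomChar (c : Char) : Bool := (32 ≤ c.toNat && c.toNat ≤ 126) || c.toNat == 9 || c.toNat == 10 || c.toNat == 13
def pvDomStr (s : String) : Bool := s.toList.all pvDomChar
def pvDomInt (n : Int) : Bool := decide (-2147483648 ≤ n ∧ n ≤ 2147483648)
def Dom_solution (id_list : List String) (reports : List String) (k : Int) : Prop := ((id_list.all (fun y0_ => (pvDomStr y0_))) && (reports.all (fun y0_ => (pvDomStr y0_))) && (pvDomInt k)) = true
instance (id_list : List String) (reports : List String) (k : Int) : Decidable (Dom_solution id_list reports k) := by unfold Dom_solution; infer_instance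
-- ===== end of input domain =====

-- B replaces A's adjacency lists + answer table + increment passes by direct per-user counting
-- over the deduplicated flat pair list (objective: simpler; not faster).

-- ===== PORT A =====
-- dict comprehension-like initialisations of A
def pvAnsInit (id_list : List String) : PySem.Dict String Int :=
  id_list.foldl (fun d x => d.insert x (0 : Int)) PySem.Dict.empty

def pvDicInit (id_list : List String) : PySem.Dict String (List String) :=
  id_list.foldl (fun d x => d.insert x ([] : List String)) PySem.Dict.empty

-- one iteration of A's report loop: skip seen reports, else log and append reporter under target
-- (where Python raises — split arity ≠ 2 or missing key — the port is total; Pre_ excludes those inputs)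
def pvStepA (st : PySem.Dict String (List String) × PySem.Set String) (report : String) :
    PySem.Dict String (List String) × PySem.Set String :=
  if st.2.contains report then st
  else
    match PySem.Str.split₀ report with
    | [a, b] => (st.1.modify b [] (fun l => l ++ [a]), st.2.add report)
    | _ => (st.1, st.2.add report)

def solution (id_list : List String) (reports : List String) (k : Int) : List Int :=
  let dic := (reports.foldl pvStepA (pvDicInit id_list, PySem.Set.empty)).1
  let answer := dic.keys.foldl
    (fun ans x =>
      if k ≤ ((dic.getD x []).length : Int) then
        (dic.getD x []).foldl (fun a y => a.modify y 0 (· + 1)) ans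
      else ans)
    (pvAnsInit id_list)
  answer.values

-- ===== PORT B =====
-- B's three comprehensions, in order.  `p[1]` / `p[0]` are ported as `getD` — exact whenever every
-- split has two words (Python raises IndexError otherwise; Pre_ excludes those inputs);
-- `sum(1 for … if …)` is ported as `countP`.
def solution_alt (id_list : List String) (reports : List String) (k : Int) : List Int :=
  let pairs := (PySem.List.dedup reports).map PySem.Str.split₀
  let hot := PySem.Set.ofList
    ((pairs.filter
        (fun p => k ≤ ((pairs.countP (fun q => q.getD 1 "" == p.getD 1 "")) : Int))).map
      (fun p => p.getD 1 ""))
  (PySem.List.dedup id_list).map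
    (fun x => ((pairs.countP
        (fun p => p.getD 0 "" == x && hot.contains (p.getD 1 ""))) : Int))

-- ===== PRECONDITION & SPEC =====
-- Pre_ is exactly the set of inputs on which the Python A returns normally: every distinct report
-- splits into exactly two words, every reported user is a known id, and every reporter whose
-- target collected at least k distinct reports is a known id (otherwise A raises Key/ValueError).
def Pre_solution (id_list : List String) (reports : List String) (k : Int) : Prop :=
  ∀ r ∈ PySem.List.dedup reports,
    (PySem.Str.split₀ r).length = 2 ∧
    (PySem.Str.split₀ r).getD 1 "" ∈ id_list ∧
    ((PySem.Str.split₀ r).getD 0 "" ∈ id_list ∨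
      (((PySem.List.dedup reports).countP
          (fun r' => (PySem.Str.split₀ r').getD 1 "" == (PySem.Str.split₀ r).getD 1 "")) : Int) < k)

instance (id_list : List String) (reports : List String) (k : Int) : Decidable (Pre_solution id_list reports k) := by
  unfold Pre_solution; infer_instance

def pvWitness_solution : List String × List String × Int := (["muzi", "frodo"], ["muzi frodo", "frodo muzi"], 1)

def Spec_solution (id_list : List String) (reports : List String) (k : Int) (out : List Int) : Prop := out = solution_alt id_list reports k
instance (id_list : List String) (reports : List String) (k : Int) (out : List Int) : Decidable (Spec_solution id_list reports k out) := by unfold Spec_solution; infer_instance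

-- ===== CLAIM (what is proved, stated in full; the proofs are below) =====
def Claim_equal_solution : Prop := ∀ (id_list : List String) (reports : List String) (k : Int), Dom_solution id_list reports k → Pre_solution id_list reports k → Spec_solution id_list reports k (solution id_list reports k)

-- ===== LEMMAS AND PROOFS =====

-- the first occurrences among `rs` of strings not yet in the seen-set `s` (what A's report loop processes)
def pvNews (s : PySem.Set String) : List String → List String
  | [] => []
  | r :: rs => if s.contains r then pvNews s rs else r :: pvNews (s.add r) rs

-- `report.split()` as a (reporter, reported) pair when it has exactly two words
def pvPair? (r : String) : Option (String × String) :=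
  match PySem.Str.split₀ r with
  | [a, b] => some (a, b)
  | _ => none

def pvBuildDic (E : List (String × String)) (d : PySem.Dict String (List String)) :
    PySem.Dict String (List String) :=
  E.foldl (fun d e => d.modify e.2 [] (fun l => l ++ [e.1])) d

-- reporters of the edges targeting y, in order
def pvGrp (E : List (String × String)) (y : String) : List String :=
  (E.filter (fun e => e.2 == y)).map (·.1)

theorem pvFoldA_eq (rs : List String) (s : PySem.Set String) (d : PySem.Dict String (List String)) :
    rs.foldl pvStepA (d, s) =
      (pvBuildDic ((pvNews s rs).filterMap pvPair?) d, rs.foldl PySem.Set.add s) := by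
  induction rs generalizing s d with
  | nil => simp [pvNews, pvBuildDic]
  | cons r rs ih =>
    by_cases h : s.contains r = true
    · have hm : r ∈ s := by simpa using h
      have hadd : s.add r = s := by simp only [PySem.Set.add, h, if_pos]
      simp [List.foldl_cons, pvStepA, hm, pvNews, ih]
    · have hm : ¬ r ∈ s := by simpa using h
      simp only [List.foldl_cons, pvStepA, pvNews]
      rcases hs : PySem.Str.split₀ r with _ | ⟨a, _ | ⟨b, _ | ⟨c, t⟩⟩⟩ <;>
        simp [hs, hm, ih, pvPair?, pvBuildDic]

theorem pvFoldAdd (rs : List String) (s : PySem.Set String) :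
    rs.foldl PySem.Set.add s = s ++ pvNews s rs := by
  induction rs generalizing s with
  | nil => simp [pvNews]
  | cons r rs ih =>
    by_cases h : s.contains r = true
    · have hm : r ∈ s := by simpa using h
      have hadd : s.add r = s := by simp only [PySem.Set.add, h, if_pos]
      simp [pvNews, hm, ih]
    · have hm : ¬ r ∈ s := by simpa using h
      have hadd : s.add r = s ++ [r] := by simp [PySem.Set.add, hm]
      simp [pvNews, hm, ih]

theorem pvNews_empty_eq_dedup (rs : List String) :
    pvNews PySem.Set.empty rs = PySem.List.dedup rs := by
  rw [PySem.List.dedup_eq_ofList, PySem.Set.ofList_eq_foldl, pvFoldAdd]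
  simp [PySem.Set.empty]

theorem pvBuildDic_getD (E : List (String × String)) (d : PySem.Dict String (List String)) (y : String) :
    (pvBuildDic E d).getD y [] = d.getD y [] ++ pvGrp E y := by
  induction E generalizing d with
  | nil => simp [pvBuildDic, pvGrp]
  | cons e E ih =>
    simp only [pvBuildDic, List.foldl_cons] at *
    rw [ih]
    by_cases h : e.2 = y
    · simp [h, pvGrp]
    · have : ¬ (e.2 == y) = true := by simpa using h
      simp [PySem.Dict.getD_modify, Ne.symm h, pvGrp, this]

theorem pvSetUpdate_absorb (l : List String) (s : PySem.Set String) (h : ∀ x ∈ l, x ∈ s) :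
    l.foldl PySem.Set.add s = s := by
  induction l with
  | nil => simp
  | cons x l ih =>
    have hx : s.contains x = true := by simpa using h x (by simp)
    have hadd : s.add x = s := by simp only [PySem.Set.add, hx, if_pos]
    simp only [List.foldl_cons, hadd]
    exact ih (fun y hy => h y (by simp [hy]))

theorem pvDicInit_getD (l : List String) (d : PySem.Dict String (List String)) (y : String)
    (h : d.getD y [] = []) :
    ((l.foldl (fun d x => d.insert x ([] : List String)) d)).getD y [] = [] := by
  induction l generalizing d with
  | nil => simpa using h
  | cons x l ih =>
    simp only [List.foldl_cons]
    exact ih _ (by rw [PySem.Dict.getD_insert]; split <;> simp [h])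

theorem pvAnsInit_getD (l : List String) (d : PySem.Dict String Int) (y : String)
    (h : d.getD y 0 = 0) :
    ((l.foldl (fun d x => d.insert x (0 : Int)) d)).getD y 0 = 0 := by
  induction l generalizing d with
  | nil => simpa using h
  | cons x l ih =>
    simp only [List.foldl_cons]
    exact ih _ (by rw [PySem.Dict.getD_insert]; split <;> simp [h])

theorem pvAnsA_getD (g : String → List String) (k : Int) (ys : List String)
    (ans : PySem.Dict String Int) (x : String) :
    (ys.foldl
        (fun ans y =>
          if k ≤ ((g y).length : Int) then (g y).foldl (fun a z => a.modify z 0 (· + 1)) ans else ans)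
        ans).getD x 0 =
      ans.getD x 0 +
        (ys.map (fun y => if k ≤ ((g y).length : Int) then ((g y).count x : Int) else 0)).sum := by
  induction ys generalizing ans with
  | nil => simp
  | cons y ys ih =>
    simp only [List.foldl_cons, List.map_cons, List.sum_cons]
    by_cases h : k ≤ ((g y).length : Int)
    · rw [if_pos h, ih, PySem.Dict.getD_foldl_modify_add_one, if_pos h]
      ring
    · rw [if_neg h, ih, if_neg h]
      ring

theorem pvAnsA_keys (g : String → List String) (k : Int) (ys : List String)
    (ans : PySem.Dict String Int)
    (h : ∀ y ∈ ys, k ≤ ((g y).length : Int) → ∀ z ∈ g y, z ∈ ans.keys) :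
    (ys.foldl
        (fun ans y =>
          if k ≤ ((g y).length : Int) then (g y).foldl (fun a z => a.modify z 0 (· + 1)) ans else ans)
        ans).keys = ans.keys := by
  induction ys generalizing ans with
  | nil => simp
  | cons y ys ih =>
    simp only [List.foldl_cons]
    by_cases hc : k ≤ ((g y).length : Int)
    · rw [if_pos hc]
      have hk : ((g y).foldl (fun a z => a.modify z 0 (· + 1)) ans).keys = ans.keys := by
        rw [PySem.Dict.keys_foldl_modify (g y) 0 (fun _ _ => (· + 1)) ans]
        exact pvSetUpdate_absorb _ _ (fun z hz => h y (by simp) hc z hz)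
      rw [ih _ (fun y' hy' hc' z hz => by rw [hk]; exact h y' (by simp [hy']) hc' z hz), hk]
    · rw [if_neg hc]
      exact ih _ (fun y' hy' hc' z hz => h y' (by simp [hy']) hc' z hz)

theorem pvValues_eq_map_getD (l : List (String × Int)) (h : (l.map (·.1)).Nodup) :
    (PySem.Dict.mk l).values = (l.map (·.1)).map (fun x => (PySem.Dict.mk l).getD x 0) := by
  induction l with
  | nil => simp
  | cons p l ih =>
    obtain ⟨a, v⟩ := p
    simp only [List.map_cons, List.nodup_cons] at h
    obtain ⟨ha, hnd⟩ := h
    simp only [PySem.Dict.values_mk, List.map_cons]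
    congr 1
    · simp [PySem.Dict.getD, PySem.Dict.get?_mk_cons]
    · rw [show ({ items := l } : PySem.Dict String Int).values = l.map (fun x => x.2) from PySem.Dict.values_mk l] at ih
      rw [ih hnd]
      apply List.map_congr_left
      intro x hx
      have hax : ¬ (a == x) = true := by
        simp only [beq_iff_eq]; rintro rfl; exact ha hx
      simp [PySem.Dict.getD, PySem.Dict.get?_mk_cons, hax]

theorem pvValues_getD (d : PySem.Dict String Int) (h : d.keys.Nodup) :
    d.values = d.keys.map (fun x => d.getD x 0) := by
  obtain ⟨l⟩ := d
  exact pvValues_eq_map_getD l h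

theorem pvGrp_length (E : List (String × String)) (z : String) :
    (pvGrp E z).length = E.countP (fun e => e.2 == z) := by
  simp [pvGrp, List.countP_eq_length_filter]

theorem pvTerm_eq (E : List (String × String)) (k : Int) (x y : String) :
    (if k ≤ ((pvGrp E y).length : Int) then ((pvGrp E y).count x : Int) else 0) =
      (E.countP (fun e => e.2 == y &&
        (e.1 == x && decide (k ≤ ((E.countP (fun e' => e'.2 == e.2) : Nat) : Int)))) : Int) := by
  by_cases h : k ≤ ((pvGrp E y).length : Int)
  · rw [if_pos h]
    have hcount : (pvGrp E y).count x = E.countP (fun e => e.2 == y && e.1 == x) := by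
      rw [pvGrp, List.count_eq_countP, List.countP_map, List.countP_filter]
      apply List.countP_congr
      intro e _
      simp [Function.comp, Bool.and_comm]
    rw [hcount]
    have : E.countP (fun e => e.2 == y && e.1 == x) =
        E.countP (fun e => e.2 == y &&
          (e.1 == x && decide (k ≤ ((E.countP (fun e' => e'.2 == e.2) : Nat) : Int)))) := by
      apply List.countP_congr
      intro e _
      by_cases hy : e.2 = y
      · subst hy
        have hd : decide (k ≤ ((E.countP (fun e' => e'.2 == e.2) : Nat) : Int)) = true := by
          rw [pvGrp_length] at h
          simpa using h
        simp [hd]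
      · have hne : ¬ (e.2 == y) = true := by simpa using hy
        simp [hne]
    rw [this]
  · rw [if_neg h]
    symm
    rw [show (0 : Int) = ((0 : Nat) : Int) by simp]
    congr 1
    rw [List.countP_eq_zero]
    intro e he
    by_cases hy : e.2 = y
    · subst hy
      have hd : ¬ (k ≤ ((E.countP (fun e' => e'.2 == e.2) : Nat) : Int)) := by
        rw [pvGrp_length] at h
        simpa using h
      simp [hd]
    · have hne : ¬ (e.2 == y) = true := by simpa using hy
      simp [hne]

theorem pvSum_indicator (ys : List String) (b : String) (c : Bool) (hnd : ys.Nodup) (hb : b ∈ ys) :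
    (ys.map (fun y => if (b == y && c) then (1 : Int) else 0)).sum = if c then (1 : Int) else 0 := by
  induction ys with
  | nil => simp at hb
  | cons y ys ih =>
    simp only [List.nodup_cons] at hnd
    simp only [List.map_cons, List.sum_cons]
    by_cases hy : b = y
    · subst hy
      have hz : (ys.map (fun y => if (b == y && c) then (1 : Int) else 0)).sum = 0 := by
        apply List.sum_eq_zero
        intro z hz
        simp only [List.mem_map] at hz
        obtain ⟨y', hy', rfl⟩ := hz
        have hby : ¬ (b == y') = true := by
          simp only [beq_iff_eq]; rintro rfl; exact hnd.1 hy'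
        simp [hby]
      rw [show (b == b && c) = c by simp, hz]
      ring
    · have hb' : b ∈ ys := (List.mem_cons.mp hb).resolve_left hy
      rw [show (b == y && c) = false by simp [hy], ih hnd.2 hb']
      simp

theorem pvSum_countP_partition (ys : List String) (hnd : ys.Nodup) (E : List (String × String))
    (hmem : ∀ e ∈ E, e.2 ∈ ys) (q : String × String → Bool) :
    (ys.map (fun y => (E.countP (fun e => e.2 == y && q e) : Int))).sum = (E.countP q : Int) := by
  induction E with
  | nil => simp
  | cons e E ih =>
    simp only [List.countP_cons]
    have hsplit : (ys.map (fun y => ((E.countP (fun e' => e'.2 == y && q e') +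
        if (e.2 == y && q e) = true then 1 else 0 : Nat) : Int))).sum =
        (ys.map (fun y => ((E.countP (fun e' => e'.2 == y && q e') : Nat) : Int))).sum +
        (ys.map (fun y => if (e.2 == y && q e) = true then (1 : Int) else 0)).sum := by
      rw [← PySem.List.sum_map_add_int]
      apply congrArg
      apply List.map_congr_left
      intro y _
      push_cast [apply_ite (fun n : Nat => (n : Int))]
      ring
    rw [hsplit, ih (fun e' he' => hmem e' (by simp [he'])),
      pvSum_indicator ys e.2 (q e) hnd (hmem e (by simp))]
    push_cast [apply_ite (fun n : Nat => (n : Int))]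
    ring

theorem pvMem_filterMap_pair (U : List String) (e : String × String)
    (h : e ∈ U.filterMap pvPair?) :
    ∃ r ∈ U, PySem.Str.split₀ r = [e.1, e.2] := by
  rw [List.mem_filterMap] at h
  obtain ⟨r, hr, hpr⟩ := h
  refine ⟨r, hr, ?_⟩
  obtain ⟨e1, e2⟩ := e
  rcases hs : PySem.Str.split₀ r with _ | ⟨a, _ | ⟨b, _ | ⟨c, t⟩⟩⟩ <;>
    simp only [pvPair?, hs, reduceCtorEq, Option.some.injEq, Prod.mk.injEq] at hpr
  obtain ⟨rfl, rfl⟩ := hpr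
  simp

-- bridge between A's pair list (filterMap pvPair?) and B's split list (map split₀):
-- under the Pre_ every split has two words, so any predicate on the two components counts alike
theorem pvCountP_bridge (U : List String) (h : ∀ r ∈ U, (PySem.Str.split₀ r).length = 2)
    (f : String → String → Bool) :
    (U.filterMap pvPair?).countP (fun e => f e.1 e.2) =
      (U.map PySem.Str.split₀).countP (fun p => f (p.getD 0 "") (p.getD 1 "")) := by
  induction U with
  | nil => simp
  | cons u U ih =>
    have ihU := ih (fun r hr => h r (by simp [hr]))
    rcases hs : PySem.Str.split₀ u with _ | ⟨a, _ | ⟨b, _ | ⟨c, t⟩⟩⟩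
    · exfalso; have h2 := h u (by simp); rw [hs] at h2; simp at h2
    · exfalso; have h2 := h u (by simp); rw [hs] at h2; simp at h2
    · have hp : pvPair? u = some (a, b) := by simp [pvPair?, hs]
      simp only [List.filterMap_cons, hp, List.map_cons, List.countP_cons, hs]
      rw [ihU]
      simp
    · exfalso; have h2 := h u (by simp); rw [hs] at h2; simp at h2

-- ===== VERDICT (by name: the statement is the Claim_ definition above) =====
theorem solution_spec : Claim_equal_solution := by
  intro id_list reports k _hdom hpre
  unfold Spec_solution
  unfold solution solution_alt
  rw [pvFoldA_eq, pvNews_empty_eq_dedup]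
  set E : List (String × String) := (PySem.List.dedup reports).filterMap pvPair? with hEdef
  set P : List (List String) := (PySem.List.dedup reports).map PySem.Str.split₀ with hPdef
  set S : List String := PySem.Set.ofList id_list with hSdef
  -- basic facts from the precondition
  have hlen2 : ∀ r ∈ PySem.List.dedup reports, (PySem.Str.split₀ r).length = 2 :=
    fun r hr => (hpre r hr).1
  have hbridge := pvCountP_bridge (PySem.List.dedup reports) hlen2
  have hcntE : ∀ b, P.countP (fun q => q.getD 1 "" == b) = E.countP (fun e => e.2 == b) := by
    intro b
    rw [hEdef, hPdef, hbridge (fun _ e2 => e2 == b)]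
  have hE2 : ∀ e ∈ E, e.2 ∈ id_list := by
    intro e he
    obtain ⟨r, hr, hsr⟩ := pvMem_filterMap_pair _ e he
    have h1 := (hpre r hr).2.1
    rw [hsr] at h1
    simpa using h1
  have hE1 : ∀ e ∈ E, k ≤ ((E.countP (fun e' => e'.2 == e.2) : Nat) : Int) → e.1 ∈ id_list := by
    intro e he hk
    obtain ⟨r, hr, hsr⟩ := pvMem_filterMap_pair _ e he
    rcases (hpre r hr).2.2 with h1 | h1
    · rw [hsr] at h1; simpa using h1
    · exfalso
      have hc := hcntE e.2
      rw [hsr] at h1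
      simp only [List.getD_cons_succ, List.getD_cons_zero] at h1
      -- h1 counts over dedup reports; transfer to E via the bridge
      have hc2 : ((PySem.List.dedup reports).countP
          (fun r' => (PySem.Str.split₀ r').getD 1 "" == e.2)) = E.countP (fun e' => e'.2 == e.2) := by
        rw [← hc, hPdef, List.countP_map]
        rfl
      omega
  -- initial dict facts
  have hD0 : ∀ y, (pvDicInit id_list).getD y ([] : List String) = [] := by
    intro y
    exact pvDicInit_getD id_list PySem.Dict.empty y rfl
  have hA0 : ∀ y, (pvAnsInit id_list).getD y 0 = 0 := by
    intro y
    exact pvAnsInit_getD id_list PySem.Dict.empty y rfl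
  have hA0keys : (pvAnsInit id_list).keys = S := by
    unfold pvAnsInit
    rw [PySem.Dict.keys_foldl_insert id_list (fun _ _ => (0 : Int)) PySem.Dict.empty,
      hSdef, PySem.Set.ofList_eq_foldl]
    rfl
  -- the built dict of reporter lists
  have hdic : ∀ y, (pvBuildDic E (pvDicInit id_list)).getD y [] = pvGrp E y := by
    intro y
    rw [pvBuildDic_getD, hD0]
    simp
  have hdickeys : (pvBuildDic E (pvDicInit id_list)).keys = S := by
    unfold pvBuildDic
    rw [PySem.Dict.keys_foldl_modify_key E (fun e => e.2) ([] : List String)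
      (fun _ e => fun l => l ++ [e.1]) (pvDicInit id_list)]
    have hk0 : (pvDicInit id_list).keys = S := by
      unfold pvDicInit
      rw [PySem.Dict.keys_foldl_insert id_list (fun _ _ => ([] : List String)) PySem.Dict.empty,
        hSdef, PySem.Set.ofList_eq_foldl]
      rfl
    rw [hk0]
    exact pvSetUpdate_absorb _ _ (fun z hz => by
      simp only [List.mem_map] at hz
      obtain ⟨e, he, rfl⟩ := hz
      rw [hSdef]
      simpa using hE2 e he)
  simp only [hdickeys, hdic]
  have hnodupS : S.Nodup := by rw [hSdef]; exact PySem.Set.nodup_ofList id_list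
  have hGmem : ∀ y z, z ∈ pvGrp E y → k ≤ ((pvGrp E y).length : Int) → z ∈ S := by
    intro y z hz hk
    simp only [pvGrp, List.mem_map, List.mem_filter] at hz
    obtain ⟨e, ⟨he, hey⟩, rfl⟩ := hz
    have heyy : e.2 = y := by simpa using hey
    rw [hSdef]
    rw [pvGrp_length] at hk
    refine (PySem.Set.mem_ofList _ _).mpr (hE1 e he ?_)
    rw [heyy]
    exact_mod_cast hk
  have hAkeys : ((S.foldl (fun ans y => if k ≤ ((pvGrp E y).length : Int) then
      (pvGrp E y).foldl (fun a z => a.modify z 0 (· + 1)) ans else ans)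
      (pvAnsInit id_list))).keys = S := by
    rw [pvAnsA_keys (fun y => pvGrp E y) k S (pvAnsInit id_list)
      (fun y hy hc z hz => by rw [hA0keys]; exact hGmem y z hz hc), hA0keys]
  rw [pvValues_getD _ (by rw [hAkeys]; exact hnodupS), hAkeys]
  -- B's id loop runs over dedup id_list = S
  have hdedupIds : PySem.List.dedup id_list = S := by
    rw [hSdef, PySem.List.dedup_eq_ofList]
  rw [hdedupIds]
  apply List.map_congr_left
  intro x _
  -- A's entry at x
  rw [pvAnsA_getD (fun y => pvGrp E y) k S (pvAnsInit id_list) x, hA0]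
  have hterm : S.map (fun y => if k ≤ ((pvGrp E y).length : Int) then
      ((pvGrp E y).count x : Int) else 0) =
      S.map (fun y => ((E.countP (fun e => e.2 == y &&
        (e.1 == x && decide (k ≤ ((E.countP (fun e' => e'.2 == e.2) : Nat) : Int)))) : Nat) : Int)) :=
    List.map_congr_left (fun y _ => pvTerm_eq E k x y)
  rw [hterm, pvSum_countP_partition S hnodupS E
    (fun e he => by rw [hSdef]; exact (PySem.Set.mem_ofList _ _).mpr (hE2 e he))
    (fun e => e.1 == x && decide (k ≤ ((E.countP (fun e' => e'.2 == e.2) : Nat) : Int)))]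
  -- B's entry at x: replace the hot-set membership by the count condition, then bridge to E
  have hhot : ∀ p ∈ P,
      (PySem.Set.ofList
          ((P.filter (fun p' => k ≤ ((P.countP (fun q => q.getD 1 "" == p'.getD 1 "")) : Int))).map
            (fun p' => p'.getD 1 ""))).contains (p.getD 1 "") =
        decide (k ≤ ((P.countP (fun q => q.getD 1 "" == p.getD 1 "")) : Int)) := by
    intro p hp
    by_cases hk : k ≤ ((P.countP (fun q => q.getD 1 "" == p.getD 1 "")) : Int)
    · simp only [hk, decide_true]
      rw [PySem.Set.contains_iff, PySem.Set.mem_ofList]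
      exact List.mem_map.mpr ⟨p, List.mem_filter.mpr ⟨hp, by simpa using hk⟩, rfl⟩
    · simp only [hk, decide_false]
      rw [← Bool.not_eq_true]
      intro hcon
      have : p.getD 1 "" ∈ (P.filter (fun p' => k ≤ ((P.countP (fun q => q.getD 1 "" == p'.getD 1 "")) : Int))).map (fun p' => p'.getD 1 "") := by
        rw [PySem.Set.contains_iff, PySem.Set.mem_ofList] at hcon
        exact hcon
      obtain ⟨p', hp', heq⟩ := List.mem_map.mp this
      obtain ⟨_, hk'⟩ := List.mem_filter.mp hp'
      rw [heq] at hk'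
      exact hk (by simpa using hk')
  have hBcong : P.countP (fun p => p.getD 0 "" == x &&
        (PySem.Set.ofList
          ((P.filter (fun p' => k ≤ ((P.countP (fun q => q.getD 1 "" == p'.getD 1 "")) : Int))).map
            (fun p' => p'.getD 1 ""))).contains (p.getD 1 "")) =
      P.countP (fun p => p.getD 0 "" == x &&
        decide (k ≤ ((E.countP (fun e' => e'.2 == p.getD 1 "") : Nat) : Int))) := by
    apply List.countP_congr
    intro p hp
    rw [hhot p hp, hcntE (p.getD 1 "")]
  rw [hBcong, hPdef, ← hbridge (fun e1 e2 => e1 == x && decide (k ≤ ((E.countP (fun e' => e'.2 == e2) : Nat) : Int)))]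
  rw [← hEdef]
  omega
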